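-- pv_equiv track=rewrite | github.com/Ananta-dot/misr_new | misr_seek_pkl.py | motif_zipper
-- ===== SOURCE A (Python) =====
-- from typing import Dict, List, Tuple
--
-- Seq = List[int]
--
-- def motif_zipper(n: int) -> Seq:
--     out=[]
--     for i in range(1, (n//2)+1):
--         j = n - i + 1
--         out += [i, j, i, j]
--     if n % 2 == 1:
--         k = (n//2)+1
--         out += [k,k]
--     return out[:2*n]
-- ===== SOURCE B (Python) =====
-- from typing import List
--
-- Seq = List[int]
--
-- def motif_zipper(n: int) -> Seq:
--     return [(p // 4 + 1) if p % 2 == 0 else (n - p // 4) for p in range(2 * n)]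
-- ===== Notes on version B (the rewrite author's own statement) =====
-- stated objective: simpler
-- what changed: Replaces the block-building loop, odd-n tail and final truncation with a single comprehension computing each output position directly from a closed-form index formula.
import Mathlib
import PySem

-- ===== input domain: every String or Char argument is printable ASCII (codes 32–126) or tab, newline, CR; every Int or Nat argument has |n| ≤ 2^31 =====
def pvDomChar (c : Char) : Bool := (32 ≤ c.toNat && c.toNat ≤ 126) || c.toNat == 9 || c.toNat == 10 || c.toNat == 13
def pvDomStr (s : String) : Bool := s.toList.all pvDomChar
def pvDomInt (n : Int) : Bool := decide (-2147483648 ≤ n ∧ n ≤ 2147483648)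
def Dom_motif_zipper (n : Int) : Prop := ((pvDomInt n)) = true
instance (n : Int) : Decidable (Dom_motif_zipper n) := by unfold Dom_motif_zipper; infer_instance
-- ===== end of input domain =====

-- B replaces A's block-building loop, odd-n tail and truncation by one comprehension
-- computing each output position from a closed-form index formula (objective: simpler).

-- ===== PORT A =====
def motif_zipper (n : Int) : List Int :=
  let out : List Int :=
    (PySem.List.pyRange 1 (PySem.Int.floordiv n 2 + 1) 1).foldl
      (fun out i => out ++ [i, n - i + 1, i, n - i + 1]) []
  let out : List Int :=
    if PySem.Int.mod n 2 = 1 then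
      out ++ [PySem.Int.floordiv n 2 + 1, PySem.Int.floordiv n 2 + 1]
    else out
  PySem.List.slice out none (some (2 * n))

-- ===== PORT B =====
def motif_zipper_alt (n : Int) : List Int :=
  (PySem.List.pyRange 0 (2 * n) 1).map
    (fun p => if PySem.Int.mod p 2 = 0 then PySem.Int.floordiv p 4 + 1
              else n - PySem.Int.floordiv p 4)

-- ===== PRECONDITION & SPEC =====
def Spec_motif_zipper (n : Int) (out : List Int) : Prop := out = motif_zipper_alt n
instance (n : Int) (out : List Int) : Decidable (Spec_motif_zipper n out) := by unfold Spec_motif_zipper; infer_instance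

-- ===== CLAIM (what is proved, stated in full; the proofs are below) =====
def Claim_equal_motif_zipper : Prop := ∀ (n : Int), Dom_motif_zipper n → Spec_motif_zipper n (motif_zipper n)

-- ===== LEMMAS AND PROOFS =====

-- B's position formula, abbreviated for the proofs.
def pvF (n p : Int) : Int :=
  if PySem.Int.mod p 2 = 0 then PySem.Int.floordiv p 4 + 1 else n - PySem.Int.floordiv p 4

-- the blocks of A's loop, flattened, are the first 4*h positions of B's formula
theorem pvBlocks (n : Int) (h : Nat) :
    (PySem.List.pyRange 1 ((h : Int) + 1) 1).flatMap
      (fun i => [i, n - i + 1, i, n - i + 1]) =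
    (PySem.List.pyRange 0 (4 * (h : Int)) 1).map (pvF n) := by
  have hmod : ∀ a : Int, PySem.Int.mod a 2 = a % 2 :=
    fun a => PySem.Int.mod_eq_emod_of_pos (by omega)
  have hdiv : ∀ a : Int, PySem.Int.floordiv a 4 = a / 4 :=
    fun a => PySem.Int.floordiv_eq_ediv_of_pos (by omega)
  induction h with
  | zero =>
    rw [show ((0:Nat):Int) + 1 = 1 by norm_num, show 4 * ((0:Nat):Int) = 0 by norm_num,
        PySem.List.pyRange_one_eq_nil (by omega), PySem.List.pyRange_one_eq_nil (by omega)]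
    rfl
  | succ h ih =>
    push_cast
    rw [PySem.List.pyRange_one_succ_right (by omega : (1:Int) ≤ (h : Int) + 1)]
    rw [show 4 * ((h : Int) + 1) = (4 * (h : Int) + 1 + 1 + 1) + 1 by ring,
        PySem.List.pyRange_one_succ_right (by omega : (0:Int) ≤ 4 * (h : Int) + 1 + 1 + 1),
        PySem.List.pyRange_one_succ_right (by omega : (0:Int) ≤ 4 * (h : Int) + 1 + 1),
        PySem.List.pyRange_one_succ_right (by omega : (0:Int) ≤ 4 * (h : Int) + 1),
        PySem.List.pyRange_one_succ_right (by omega : (0:Int) ≤ 4 * (h : Int))]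
    simp only [List.flatMap_append, List.map_append, ih, List.flatMap_cons, List.flatMap_nil,
      List.map_cons, List.map_nil, List.append_nil, List.append_assoc]
    congr 1
    simp only [pvF, hmod, hdiv]
    have e0 : (4 * (h : Int)) % 2 = 0 := by omega
    have e1 : (4 * (h : Int) + 1) % 2 = 1 := by omega
    have e2 : (4 * (h : Int) + 1 + 1) % 2 = 0 := by omega
    have e3 : (4 * (h : Int) + 1 + 1 + 1) % 2 = 1 := by omega
    simp only [e0, e1, e2, e3]
    norm_num
    omega

theorem h2n_nil_slice {b : Int} : PySem.List.slice ([] : List Int) none (some b) = [] := by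
  simp [PySem.List.slice]

-- ===== VERDICT (by name: the statement is the Claim_ definition above) =====
theorem motif_zipper_spec : Claim_equal_motif_zipper := by
  intro n _
  show motif_zipper n = motif_zipper_alt n
  unfold motif_zipper motif_zipper_alt
  rw [PySem.List.foldl_append_eq_flatMap]
  simp only [List.nil_append]
  by_cases hn : 0 < n
  · -- positive n
    have hfd : PySem.Int.floordiv n 2 = n / 2 := PySem.Int.floordiv_eq_ediv_of_pos (by omega)
    have hmd : PySem.Int.mod n 2 = n % 2 := PySem.Int.mod_eq_emod_of_pos (by omega)
    have hcast : (((n / 2).toNat : Int)) = n / 2 := Int.toNat_of_nonneg (by omega)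
    rw [hfd, hmd, ← hcast, pvBlocks]
    by_cases hpar : n % 2 = 1
    · -- odd n: the blocks plus the (k,k) tail fill exactly 2n positions
      rw [if_pos hpar]
      have h2n : 2 * n = (4 * (((n / 2).toNat : Int)) + 1) + 1 := by omega
      rw [PySem.List.slice_to _ (by omega : (0:Int) ≤ 2 * n),
          List.take_of_length_le (by
            simp only [List.length_append, List.length_map, PySem.List.length_pyRange_one,
              List.length_cons, List.length_nil]
            omega)]
      conv_rhs => rw [h2n,
        PySem.List.pyRange_one_succ_right (by omega : (0:Int) ≤ 4 * (((n / 2).toNat : Int)) + 1),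
        PySem.List.pyRange_one_succ_right (by omega : (0:Int) ≤ 4 * (((n / 2).toNat : Int)))]
      have e0 : pvF n (4 * (((n / 2).toNat : Int))) = ((n / 2).toNat : Int) + 1 := by
        simp only [pvF, PySem.Int.mod_eq_emod_of_pos (by omega : (0:Int) < 2),
          PySem.Int.floordiv_eq_ediv_of_pos (by omega : (0:Int) < 4)]
        rw [if_pos (by omega)]
        omega
      have e1 : pvF n (4 * (((n / 2).toNat : Int)) + 1) = ((n / 2).toNat : Int) + 1 := by
        simp only [pvF, PySem.Int.mod_eq_emod_of_pos (by omega : (0:Int) < 2),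
          PySem.Int.floordiv_eq_ediv_of_pos (by omega : (0:Int) < 4)]
        rw [if_neg (by omega)]
        omega
      rw [show (fun p => if PySem.Int.mod p 2 = 0 then PySem.Int.floordiv p 4 + 1
            else n - PySem.Int.floordiv p 4) = pvF n from rfl]
      simp only [List.map_append, List.map_cons, List.map_nil, e0, e1, List.append_assoc]
      rfl
    · -- even n: the blocks already fill exactly 2n positions
      rw [if_neg (by omega : ¬ n % 2 = 1)]
      have h2n : 4 * (((n / 2).toNat : Int)) = 2 * n := by omega
      rw [h2n, PySem.List.slice_to _ (by omega : (0:Int) ≤ 2 * n)]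
      rw [List.take_of_length_le (by
        simp only [List.length_map, PySem.List.length_pyRange_one]
        omega)]
      rw [show (fun p => if PySem.Int.mod p 2 = 0 then PySem.Int.floordiv p 4 + 1
            else n - PySem.Int.floordiv p 4) = pvF n from rfl]
  · -- n ≤ 0: both sides are empty
    have hB : PySem.List.pyRange 0 (2 * n) 1 = [] :=
      PySem.List.pyRange_one_eq_nil (by omega)
    have hfd : PySem.Int.floordiv n 2 = n / 2 := PySem.Int.floordiv_eq_ediv_of_pos (by omega)
    have hA : PySem.List.pyRange 1 (PySem.Int.floordiv n 2 + 1) 1 = [] :=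
      PySem.List.pyRange_one_eq_nil (by rw [hfd]; omega)
    rw [hA, hB]
    simp only [List.flatMap_nil, List.nil_append, List.map_nil]
    by_cases hpar : PySem.Int.mod n 2 = 1
    · rw [if_pos hpar]
      have hmd : PySem.Int.mod n 2 = n % 2 := PySem.Int.mod_eq_emod_of_pos (by omega)
      have hodd : n % 2 = 1 := by rw [← hmd]; exact hpar
      -- n is odd and ≤ 0, so 2*n ≤ -2: the slice drops the whole two-element list
      have h2n : 2 * n = -(((-(2 * n)).toNat : Int)) := by omega
      rw [h2n, PySem.List.slice_to_neg_natCast _ _ (by omega)]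
      rw [show ([PySem.Int.floordiv n 2 + 1, PySem.Int.floordiv n 2 + 1] : List Int).length
          - (-(2 * n)).toNat = 0 by simp; omega, List.take_zero]
    · rw [if_neg hpar, h2n_nil_slice]
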